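/- GENERATED by farm/mkstatement.py from design/units.tsv (unit `reallocarray`) and the Specs of ProgX/Base/Spec/*.lean — do not edit.
   THE STATEMENT of the proof unit `reallocarray`: the function `reallocarray` (21 instructions) satisfies its contract,
   given the contracts of its callees. What the names mean: ProgX/Base/Spec/Basic.lean. The theorem to prove:
   `theorem reallocarray_ok : ProgX.Base.Spec.reallocarray.Statement`. -/
import ProgX.Base.Spec.Heap
namespace ProgX.Base.Spec.reallocarray
open X86 X86.User Asan

/-- The statement of unit `reallocarray`. -/
def Statement : Prop :=
  ∀ (Lay : Layout) (_hLay : Lay.hi = 0x1000000) (μ : Microarch) (_hμ : UserX.MicroOK μ) (u₀ : State)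
    (_hcode : HasCodeNat Lay u₀ ProgX.Base.L.reallocarray.entry ProgX.Base.Code.code_reallocarray.nat ProgX.Base.L.reallocarray.size)
    (_h_heap_product_ok : Calls Lay μ ProgX.Base.WayInv (ProgX.Base.conv u₀) ProgX.Base.L.heap_product_ok.entry ProgX.Base.Spec.heap_product_ok.spec)
    (_h_realloc : ∀ (H : Heap) (rest : List Obj) (frames : List (Nat × FrameLayout)) (n c : Nat), Calls Lay μ ProgX.Base.WayInv (ProgX.Base.conv u₀) ProgX.Base.L.realloc.entry (ProgX.Base.Spec.realloc.spec H rest frames n c)),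
    ∀ (H : Heap) (rest : List Obj) (frames : List (Nat × FrameLayout)) (n c : Nat), Calls Lay μ ProgX.Base.WayInv (ProgX.Base.conv u₀) ProgX.Base.L.reallocarray.entry (ProgX.Base.Spec.reallocarray.spec H rest frames n c)

end ProgX.Base.Spec.reallocarray
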